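-- pv_equiv track=rewrite | github.com/SIDED00R/Code_training | 백준/Gold/12889. 특별한 문자열/특별한 문자열.py | next_string_finder
-- ===== SOURCE A (Python) =====
-- def special_checker(string):
--     for idx in range(1, len(string)):
--         left_string = string[:idx]
--         right_string = string[idx:]
--         if left_string >= right_string:
--             return False
--     return True
--
-- def next_string_finder(special_string):
--     length = len(special_string)
--     special_string = list(special_string)
--     for idx in range(length - 1, -1, -1):
--         if special_string[idx] == '1':
--             continue
--         next_string = special_string[:]
--
--         for next_idx in range(idx, length):
--             next_string[next_idx] = '1'
--
--         if not special_checker(next_string):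
--             continue
--
--         for next_idx in range(idx + 1, length):
--             next_string[next_idx] = '0'
--             if not special_checker(next_string):
--                 next_string[next_idx] = '1'
--
--         return ''.join(next_string)
--
--     return '-1'
-- ===== SOURCE B (Python) =====
-- def _is_special(t):
--     # Duval-style O(n) scan: one pass with a match length k, no substring
--     # comparisons and no slicing.  t is special iff the scan never sees a
--     # character below the expected periodic continuation and ends with k == 0.
--     n = len(t)
--     j, k = 1, 0
--     while j < n:
--         if t[j] == t[k]:
--             k += 1
--         elif t[j] > t[k]:
--             k = 0
--         else:
--             return False
--         j += 1
--     return k == 0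
--
--
-- def next_string_finder(special_string):
--     n = len(special_string)
--     idx = n - 1
--     while idx >= 0:
--         if special_string[idx] != '1':
--             head = special_string[:idx] + '1'
--             if _is_special(head + '1' * (n - idx - 1)):
--                 out = head
--                 for j in range(idx + 1, n):
--                     out += '0' if _is_special(out + '0' + '1' * (n - j - 1)) else '1'
--                 return out
--         idx -= 1
--     return '-1'
-- ===== Notes on version B (the rewrite author's own statement) =====
-- stated objective: faster
-- what changed: The O(n^2)-slicing prefix-vs-suffix validity check is replaced by a Duval-style single O(n) scan (match-length counter against the periodic continuation, no substring comparisons, no slicing), and the candidate strings are built functionally left-to-right instead of copying and mutating a char list.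
import Mathlib
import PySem

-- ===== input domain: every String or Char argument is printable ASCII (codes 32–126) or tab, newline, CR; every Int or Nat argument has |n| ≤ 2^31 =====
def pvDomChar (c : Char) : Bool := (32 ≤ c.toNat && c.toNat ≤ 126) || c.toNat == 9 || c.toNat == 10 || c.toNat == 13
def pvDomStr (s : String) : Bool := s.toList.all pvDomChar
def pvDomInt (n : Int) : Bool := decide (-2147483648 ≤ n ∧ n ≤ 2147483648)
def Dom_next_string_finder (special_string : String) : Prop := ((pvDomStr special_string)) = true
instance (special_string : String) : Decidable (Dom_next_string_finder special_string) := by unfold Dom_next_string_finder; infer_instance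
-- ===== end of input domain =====

-- B replaces A's O(n^2) prefix-vs-suffix slice-comparison validity check by a Duval-style
-- single left-to-right scan (a match-length counter against the periodic continuation; no
-- slicing, no substring comparisons) and builds candidates functionally instead of mutating
-- a char list; measured much faster (asymptotically cheaper validity check).

-- ===== PORT A =====
-- special_checker: for idx in 1..len-1, 'if left >= right: return False' ( '>=' on Python
-- sequences is '¬ <' of the lexicographic order, which on List Char is Lean's '<' ).
def pvCheckA (s : List Char) : List Int → Bool
  | [] => true
  | i :: rest =>
    let left := PySem.List.slice s none (some i)
    let right := PySem.List.slice s (some i) none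
    if ¬ (left < right) then false else pvCheckA s rest

def pvSpecialChecker (s : List Char) : Bool :=
  pvCheckA s (PySem.List.pyRange 1 (PySem.List.len s) 1)

-- body of A's inner minimisation loop: next_string[j]='0'; if not special: next_string[j]='1'
def pvStepA (a : List Char) (j : Int) : List Char :=
  let t := PySem.List.pySetD a j '0'
  if pvSpecialChecker t = false then PySem.List.pySetD t j '1' else t

-- the body of 'for idx in range(length-1,-1,-1)' with its early 'return'; none = fell through
def pvLoopA (s : List Char) (n : Int) : List Int → Option (List Char)
  | [] => none
  | idx :: rest =>
    if PySem.List.pyGetD s idx ' ' = '1' then pvLoopA s n rest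
    else
      -- next_string = special_string[:]; for j in range(idx, length): next_string[j] = '1'
      let ns := (PySem.List.pyRange idx n 1).foldl (fun a j => PySem.List.pySetD a j '1') s
      if pvSpecialChecker ns = false then pvLoopA s n rest
      else
        -- for j in range(idx+1, length): set '0', revert to '1' if not special
        some ((PySem.List.pyRange (idx + 1) n 1).foldl pvStepA ns)

def next_string_finder (special_string : String) : String :=
  let length := PySem.List.len special_string.toList
  match pvLoopA special_string.toList length (PySem.List.pyRange (length - 1) (-1) (-1)) with
  | some ns => String.ofList ns          -- ''.join(next_string)
  | none => "-1"

-- ===== PORT B =====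
-- _is_special: 'j, k = 1, 0; while j < n: if t[j]==t[k]: k+=1 elif t[j]>t[k]: k=0
-- else: return False; j += 1; return k == 0'.  The while loop always advances j, so it is
-- the fold over j = 1..n-1 with state k; 'return False' is the none branch.
def pvDuvalGo (t : List Char) : List Int → Int → Option Int
  | [], k => some k
  | j :: rest, k =>
    if PySem.List.pyGetD t j ' ' = PySem.List.pyGetD t k ' ' then
      pvDuvalGo t rest (k + 1)
    else if PySem.List.pyGetD t k ' ' < PySem.List.pyGetD t j ' ' then
      pvDuvalGo t rest 0
    else none

def pvIsSpecialB (t : List Char) : Bool :=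
  match pvDuvalGo t (PySem.List.pyRange 1 (PySem.List.len t) 1) 0 with
  | some k => k == 0
  | none => false

-- for j in range(idx+1, n): out += '0' if _is_special(out+'0'+'1'*(n-j-1)) else '1'
def pvMinB (n : Int) : List Int → List Char → List Char
  | [], out => out
  | j :: rest, out =>
    if pvIsSpecialB ((out ++ ['0']) ++ PySem.List.pyRepeat ['1'] (n - j - 1)) then
      pvMinB n rest (out ++ ['0'])
    else
      pvMinB n rest (out ++ ['1'])

-- 'idx = n-1; while idx >= 0: if s[idx] != '1': … ; idx -= 1' — the while over idx
def pvLoopB (s : List Char) (n : Int) : List Int → Option (List Char)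
  | [] => none
  | idx :: rest =>
    if ¬ (PySem.List.pyGetD s idx ' ' = '1') then
      let head := PySem.List.slice s none (some idx) ++ ['1']   -- s[:idx] + '1'
      if pvIsSpecialB (head ++ PySem.List.pyRepeat ['1'] (n - idx - 1)) then
        some (pvMinB n (PySem.List.pyRange (idx + 1) n 1) head)
      else pvLoopB s n rest
    else pvLoopB s n rest

def next_string_finder_alt (special_string : String) : String :=
  let n := PySem.List.len special_string.toList
  match pvLoopB special_string.toList n (PySem.List.pyRange (n - 1) (-1) (-1)) with
  | some out => String.ofList out
  | none => "-1"

-- ===== PRECONDITION & SPEC =====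
def Spec_next_string_finder (special_string : String) (out : String) : Prop := out = next_string_finder_alt special_string
instance (special_string : String) (out : String) : Decidable (Spec_next_string_finder special_string out) := by unfold Spec_next_string_finder; infer_instance

-- ===== CLAIM (what is proved, stated in full; the proofs are below) =====
def Claim_equal_next_string_finder : Prop := ∀ (special_string : String), Dom_next_string_finder special_string → Spec_next_string_finder special_string (next_string_finder special_string)

-- ===== LEMMAS AND PROOFS =====

-- ---- order facts on List Char ('<' is the lexicographic order; same order Python uses) ----

theorem pv_append_not_lt (u : List Char) : ∀ r, ¬ (u ++ r < u) := by
  induction u with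
  | nil => intro r h; cases h
  | cons x xs ih => intro r h; exact ih r ((List.cons_lt_cons_self).mp h)

theorem pv_append_lt_append (u a b : List Char) : u ++ a < u ++ b ↔ a < b := by
  induction u with
  | nil => exact Iff.rfl
  | cons x xs ih => simpa [List.cons_lt_cons_self] using ih

-- a strict lexicographic comparison is a strict prefix or a first strict difference
theorem pv_lt_cases (u v : List Char) (h : u < v) :
    (∃ w, v = u ++ w ∧ w ≠ []) ∨
      ∃ p x y xs ys, u = p ++ x :: xs ∧ v = p ++ y :: ys ∧ x < y := by
  induction h with
  | nil => exact Or.inl ⟨_, rfl, by simp⟩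
  | @rel a as b bs hab => exact Or.inr ⟨[], a, b, as, bs, rfl, rfl, hab⟩
  | @cons a as bs h ih =>
    rcases ih with ⟨w, rfl, hw⟩ | ⟨p, x, y, xs, ys, rfl, rfl, hxy⟩
    · exact Or.inl ⟨w, rfl, hw⟩
    · exact Or.inr ⟨a :: p, x, y, xs, ys, rfl, rfl, hxy⟩

-- ---- the heart: every proper prefix < its suffix  ↔  the string < every proper suffix ----

def pvPrefLt (t : List Char) : Prop :=
  ∀ i : Nat, 0 < i → i < t.length → t.take i < t.drop i

def pvSufLt (t : List Char) : Prop :=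
  ∀ i : Nat, 0 < i → i < t.length → t < t.drop i

-- if v is a suffix of u ++ v extending u with w, and u ++ v already beats w, it beats v
theorem pv_lt_suffix_step (u v w : List Char) (hv : v = u ++ w) (h : u ++ v < w) :
    u ++ v < v := by
  by_cases hvw : v < w
  · rw [hv] at hvw ⊢
    exact (pv_append_lt_append u _ _).mpr hvw
  · exact lt_of_lt_of_le h (not_lt.mp hvw)

theorem pv_suf_of_pref (t : List Char) (H : pvPrefLt t) : pvSufLt t := by
  have main : ∀ m i : Nat, 0 < i → i < t.length → t.length - i = m → t < t.drop i := by
    intro m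
    induction m using Nat.strong_induction_on with
    | _ m ih =>
      intro i hi hin hm
      have htd : t = t.take i ++ t.drop i := (List.take_append_drop i t).symm
      have hlu : (t.take i).length = i := List.length_take_of_le (le_of_lt hin)
      rcases pv_lt_cases _ _ (H i hi hin) with ⟨w, hw, hwne⟩ | ⟨p, x, y, xs, ys, hu, hv, hxy⟩
      · -- t.drop i = t.take i ++ w : strict prefix; descend to the suffix w = t.drop (i+i)
        have hww : t.drop (i + i) = w := by
          have h1 : t.drop (i + i) = List.drop i (t.drop i) := by
            rw [List.drop_drop]
          rw [h1, hw, List.drop_left' hlu]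
        have hdlen : (t.drop i).length = t.length - i := List.length_drop ..
        have hwlen : w.length = t.length - i - i := by
          have h2 := congrArg List.length hw
          rw [hdlen, List.length_append, hlu] at h2
          omega
        have hii : i + i < t.length := by
          have h3 : w.length ≠ 0 := by simpa using hwne
          omega
        have hIH : t < w := by
          rw [← hww]
          exact ih (t.length - (i + i)) (by omega) (i + i) (by omega) hii rfl
        conv_lhs => rw [htd]
        exact pv_lt_suffix_step _ _ _ hw (by rw [← htd]; exact hIH)
      · -- first strict difference: t < t.drop i by comparing x with y at position p.length
        conv_lhs => rw [htd, hu]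
        conv_rhs => rw [hv]
        rw [List.append_assoc]
        exact List.lex_lt.mp (List.Lex.append_left _ (List.Lex.rel hxy) p)
  intro i hi hin
  exact main (t.length - i) i hi hin rfl

theorem pv_pref_of_suf (t : List Char) (H : pvSufLt t) : pvPrefLt t := by
  intro i hi hin
  have h1 : ¬ (t < t.take i) := by
    have h2 := pv_append_not_lt (t.take i) (t.drop i)
    rwa [List.take_append_drop] at h2
  exact lt_of_le_of_lt (not_lt.mp h1) (H i hi hin)

-- ---- A's checker computes pvPrefLt ----

theorem pv_checkA_iff (s : List Char) (l : List Int) :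
    pvCheckA s l = true ↔
      ∀ i ∈ l, PySem.List.slice s none (some i) < PySem.List.slice s (some i) none := by
  induction l with
  | nil => simp [pvCheckA]
  | cons i rest ih =>
    rw [pvCheckA]
    by_cases h : PySem.List.slice s none (some i) < PySem.List.slice s (some i) none
    · simp [h, ih]
    · simp [h]

theorem pv_specialChecker_iff (s : List Char) : pvSpecialChecker s = true ↔ pvPrefLt s := by
  rw [pvSpecialChecker, pv_checkA_iff]
  constructor
  · intro h i hi hin
    have h4 := h (i : Int) (by rw [PySem.List.mem_pyRange_one]; simp; omega)
    rwa [PySem.List.slice_to_natCast, PySem.List.slice_from_natCast] at h4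
  · intro h i hil
    rw [PySem.List.mem_pyRange_one] at hil
    simp only [PySem.List.len_eq] at hil
    obtain ⟨h1, h2⟩ := hil
    have h0 : (0 : Int) ≤ i := by omega
    rw [PySem.List.slice_to s h0, PySem.List.slice_from s h0]
    exact h i.toNat (by omega) (by omega)

-- ---- B's Duval scan computes pvSufLt (the key new correctness argument) ----

theorem pv_getD_drop (l : List Char) (i x : Nat) :
    (l.drop i).getD x ' ' = l.getD (i + x) ' ' := by
  simp [List.getD_eq_getElem?_getD, List.getElem?_drop]

theorem pv_getD_take (l : List Char) (p x : Nat) (h : x < p) :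
    (l.take p).getD x ' ' = l.getD x ' ' := by
  simp [List.getD_eq_getElem?_getD, h]

theorem pv_lex_iff (l1 l2 : List Char) :
    l1 < l2 ↔ ∃ m : Nat,
      (∀ x, x < m → l1.getD x ' ' = l2.getD x ' ') ∧
      ((m = l1.length ∧ m < l2.length) ∨
        (m < l1.length ∧ m < l2.length ∧ l1.getD m ' ' < l2.getD m ' ')) := by
  induction l1 generalizing l2 with
  | nil =>
    cases l2 with
    | nil =>
      constructor
      · intro h; exact absurd h (lt_irrefl _)
      · rintro ⟨m, -, (⟨h1, h2⟩ | ⟨h1, -⟩)⟩ <;> simp_all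
    | cons b bs =>
      constructor
      · intro _; exact ⟨0, fun x hx => absurd hx (Nat.not_lt_zero x), Or.inl ⟨rfl, by simp⟩⟩
      · intro _; exact List.nil_lt_cons b bs
  | cons a as ih =>
    cases l2 with
    | nil =>
      constructor
      · intro h; exact absurd (List.lex_lt.mpr h) (by intro h2; cases h2)
      · rintro ⟨m, -, (⟨-, h2⟩ | ⟨-, h2, -⟩)⟩ <;> exact absurd h2 (by simp)
    | cons b bs =>
      rw [List.cons_lt_cons_iff]
      constructor
      · rintro (hab | ⟨rfl, hrec⟩)
        · exact ⟨0, fun x hx => absurd hx (Nat.not_lt_zero x),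
            Or.inr ⟨by simp, by simp, by simpa using hab⟩⟩
        · obtain ⟨m, hEq, hCase⟩ := (ih bs).mp hrec
          refine ⟨m + 1, ?_, ?_⟩
          · intro x hx
            cases x with
            | zero => simp
            | succ x => simpa using hEq x (by omega)
          · rcases hCase with ⟨h1, h2⟩ | ⟨h1, h2, h3⟩
            · exact Or.inl ⟨by simp [h1], by simp; omega⟩
            · exact Or.inr ⟨by simp; omega, by simp; omega, by simpa using h3⟩
      · rintro ⟨m, hEq, hCase⟩
        cases m with
        | zero =>
          rcases hCase with ⟨h1, -⟩ | ⟨-, -, h3⟩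
          · exact absurd h1.symm (by simp)
          · exact Or.inl (by simpa using h3)
        | succ m =>
          have hab : a = b := by simpa using hEq 0 (by omega)
          refine Or.inr ⟨hab, (ih bs).mpr ⟨m, ?_, ?_⟩⟩
          · intro x hx; simpa using hEq (x + 1) (by omega)
          · rcases hCase with ⟨h1, h2⟩ | ⟨h1, h2, h3⟩
            · exact Or.inl ⟨by simpa using h1, by simpa using h2⟩
            · exact Or.inr ⟨by simpa using h1, by simpa using h2, by simpa using h3⟩

theorem pv_mismatch (u : List Char) (b : Nat) (hbl : b < u.length)
    (h : u < u.drop b) :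
    ∃ m, m < u.length - b ∧ (∀ x, x < m → u.getD x ' ' = u.getD (b + x) ' ') ∧
      u.getD m ' ' < u.getD (b + m) ' ' := by
  rcases (pv_lex_iff _ _).mp h with ⟨m, heq, hcase⟩
  rcases hcase with ⟨hm1, hm2⟩ | ⟨hm1, hm2, hm3⟩
  · rw [List.length_drop] at hm2; omega
  · rw [List.length_drop] at hm2
    refine ⟨m, hm2, fun x hx => ?_, ?_⟩
    · have := heq x hx; rwa [pv_getD_drop] at this
    · rwa [pv_getD_drop] at hm3

theorem pv_period_mod (t : List Char) (p j : Nat) (hp : 0 < p)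
    (HP : ∀ m, m < j - p → t.getD (p + m) ' ' = t.getD m ' ') :
    ∀ m, m < j → t.getD m ' ' = t.getD (m % p) ' ' := by
  intro m
  induction m using Nat.strong_induction_on with
  | _ m ihm =>
    intro hm
    by_cases hmp : m < p
    · rw [Nat.mod_eq_of_lt hmp]
    · have h2 := HP (m - p) (by omega)
      have h3 : p + (m - p) = m := by omega
      rw [h3] at h2
      rw [h2, ihm (m - p) (by omega) (by omega), Nat.mod_eq_sub_mod (by omega : m ≥ p)]

theorem pv_fail (t : List Char) (j k : Nat) (hk : k < j) (hj : j < t.length)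
    (HP : ∀ m, m < k → t.getD ((j - k) + m) ' ' = t.getD m ' ')
    (h : t.getD j ' ' < t.getD k ' ') : ¬ pvSufLt t := by
  intro H
  have h2 := H (j - k) (by omega) (by omega)
  rcases (pv_lex_iff _ _).mp h2 with ⟨m, heq, hcase⟩
  rcases hcase with ⟨hm1, hm2⟩ | ⟨hm1, hm2, hm3⟩
  · rw [List.length_drop] at hm2; omega
  · rw [List.length_drop] at hm2
    rw [pv_getD_drop] at hm3
    rcases lt_trichotomy m k with hmk | hmk | hmk
    · rw [HP m hmk] at hm3; exact lt_irrefl _ hm3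
    · subst hmk
      have hpk : j - m + m = j := by omega
      rw [hpk] at hm3
      exact lt_irrefl _ (hm3.trans h)
    · have h4 := heq k hmk
      rw [pv_getD_drop] at h4
      have hpk : j - k + k = j := by omega
      rw [hpk] at h4
      rw [h4] at h
      exact lt_irrefl _ h

theorem pv_end (t : List Char) (k : Nat) (hk0 : 0 < k) (hkn : k < t.length)
    (HP : ∀ m, m < k → t.getD ((t.length - k) + m) ' ' = t.getD m ' ') : ¬ pvSufLt t := by
  intro H
  have h2 := H (t.length - k) (by omega) (by omega)
  rcases (pv_lex_iff _ _).mp h2 with ⟨m, heq, hcase⟩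
  rcases hcase with ⟨hm1, hm2⟩ | ⟨hm1, hm2, hm3⟩
  · rw [List.length_drop] at hm2; omega
  · rw [List.length_drop] at hm2
    rw [pv_getD_drop, HP m (by omega)] at hm3
    exact lt_irrefl _ hm3

theorem pv_ext (t : List Char) (j k : Nat) (hk : k < j) (hj : j < t.length)
    (HP : ∀ m, m < k → t.getD ((j - k) + m) ' ' = t.getD m ' ')
    (HL : pvSufLt (t.take (j - k)))
    (h : t.getD k ' ' < t.getD j ' ') : pvSufLt (t.take (j + 1)) := by
  have hp : 0 < j - k := by omega
  have hpj : j - k ≤ j := by omega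
  set p := j - k with hpdef
  have hmod : ∀ m, m < j → t.getD m ' ' = t.getD (m % p) ' ' := by
    apply pv_period_mod t p j hp
    intro m hm
    exact HP m (by omega)
  have hc' : t.getD (j % p) ' ' < t.getD j ' ' := by
    have e1 : j % p = k % p := by
      have e0 : j = k + p := by omega
      rw [e0, Nat.add_mod_right]
    have e2 := hmod k (by omega)
    rw [e2, ← e1] at h
    exact h
  intro i hi0 hile
  have hWlen : (t.take (j + 1)).length = j + 1 := by
    rw [List.length_take]; omega
  rw [hWlen] at hile
  have hij : i ≤ j := by omega
  have hW : ∀ y, y < j + 1 → (t.take (j + 1)).getD y ' ' = t.getD y ' ' :=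
    fun y hy => pv_getD_take t (j + 1) y hy
  apply (pv_lex_iff _ _).mpr
  have hdlen : ((t.take (j + 1)).drop i).length = j + 1 - i := by
    rw [List.length_drop, hWlen]
  -- abbreviation for the suffix entries
  have hS : ∀ x, x < j + 1 - i →
      ((t.take (j + 1)).drop i).getD x ' ' = t.getD (i + x) ' ' := by
    intro x hx
    rw [pv_getD_drop, hW (i + x) (by omega)]
  by_cases hb : i % p = 0
  · -- p divides i: positions x and i+x agree mod p
    have hq := Nat.div_add_mod i p
    rw [hb, Nat.add_zero] at hq          -- p * (i / p) = i
    refine ⟨j - i, ?_, Or.inr ⟨by omega, by omega, ?_⟩⟩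
    · intro x hx
      rw [hW x (by omega), hS x (by omega)]
      rw [hmod x (by omega), hmod (i + x) (by omega)]
      have h6 : (p * (i / p) + x) % p = x % p := Nat.mul_add_mod p (i / p) x
      rw [hq] at h6
      rw [h6]
    · rw [hW (j - i) (by omega), hS (j - i) (by omega)]
      have e3 : i + (j - i) = j := by omega
      rw [e3]
      have e4 : (j - i) % p = j % p := by
        have h5 : (j - p * (i / p)) % p = j % p := Nat.sub_mul_mod (by rw [hq]; omega)
        rwa [hq] at h5
      rw [hmod (j - i) (by omega), e4]
      exact hc'
  · -- b := i % p ≠ 0: use the Lyndon property of u = t.take p at shift b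
    have hbp : i % p < p := Nat.mod_lt i hp
    have hb0 : 0 < i % p := by omega
    set b := i % p with hbdef
    have hup : (t.take p).length = p := by rw [List.length_take]; omega
    have hLb := HL b hb0 (by rw [hup]; exact hbp)
    obtain ⟨m, hm, hmeq, hmlt⟩ := pv_mismatch (t.take p) b (by omega) hLb
    rw [hup] at hm                        -- m < p - b
    have hu : ∀ x, x < p → (t.take p).getD x ' ' = t.getD x ' ' :=
      fun x hx => pv_getD_take t p x hx
    have hmeq' : ∀ x, x < m → t.getD x ' ' = t.getD (b + x) ' ' := by
      intro x hx
      have := hmeq x hx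
      rwa [hu x (by omega), hu (b + x) (by omega)] at this
    have hmlt' : t.getD m ' ' < t.getD (b + m) ' ' := by
      have := hmlt
      rwa [hu m (by omega), hu (b + m) (by omega)] at this
    have hq := Nat.div_add_mod i p        -- p * (i / p) + b = i
    have hmodi : ∀ x, x < p - b → (i + x) % p = b + x := by
      intro x hx
      have h6 : i + x = p * (i / p) + (b + x) := by omega
      rw [h6, Nat.mul_add_mod, Nat.mod_eq_of_lt (by omega)]
    by_cases hcase : i + m < j
    · -- mismatch happens inside the word
      refine ⟨m, ?_, Or.inr ⟨by omega, by omega, ?_⟩⟩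
      · intro x hx
        rw [hW x (by omega), hS x (by omega)]
        rw [hmod (i + x) (by omega), hmodi x (by omega)]
        exact hmeq' x hx
      · rw [hW m (by omega), hS m (by omega)]
        rw [hmod (i + m) (by omega), hmodi m (by omega)]
        exact hmlt'
    · -- the compared suffix runs into the appended character first
      have hjim : j - i ≤ m := by omega
      refine ⟨j - i, ?_, Or.inr ⟨by omega, by omega, ?_⟩⟩
      · intro x hx
        rw [hW x (by omega), hS x (by omega)]
        rw [hmod (i + x) (by omega), hmodi x (by omega)]
        exact hmeq' x (by omega)
      · rw [hW (j - i) (by omega), hS (j - i) (by omega)]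
        have e3 : i + (j - i) = j := by omega
        rw [e3]
        have key : t.getD (b + (j - i)) ' ' = t.getD (j % p) ' ' := by
          have e7 : b + (j - i) = j - p * (i / p) := by omega
          have e8 : j - p * (i / p) < p := by omega
          have h5 : (j - p * (i / p)) % p = j % p := Nat.sub_mul_mod (by omega)
          congr 1
          rw [e7, ← h5, Nat.mod_eq_of_lt e8]
        rcases lt_or_eq_of_le hjim with hlt2 | heq2
        · have := hmeq' (j - i) hlt2
          rw [this, key]
          exact hc'
        · rw [← heq2] at hmlt'
          calc t.getD (j - i) ' ' < t.getD (b + (j - i)) ' ' := hmlt'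
            _ = t.getD (j % p) ' ' := key
            _ < t.getD j ' ' := hc'

theorem pv_duval_main (fuel : Nat) : ∀ (t : List Char) (j k : Nat),
    j + fuel = t.length → 0 < j → k < j →
    (∀ m, m < k → t.getD ((j - k) + m) ' ' = t.getD m ' ') →
    pvSufLt (t.take (j - k)) →
    ((pvDuvalGo t (PySem.List.pyRange (j : Int) ((t.length : Nat) : Int) 1) (k : Int) = some 0)
      ↔ pvSufLt t) := by
  induction fuel with
  | zero =>
    intro t j k hfuel hj0 hkj HP HL
    have hjn : j = t.length := by omega
    rw [PySem.List.pyRange_one_eq_nil (by omega)]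
    simp only [pvDuvalGo, Option.some.injEq]
    constructor
    · intro hsome
      have hk0 : k = 0 := by exact_mod_cast hsome
      subst hk0
      rw [Nat.sub_zero, hjn, List.take_length] at HL
      exact HL
    · intro H
      by_cases hk0 : k = 0
      · simp [hk0]
      · exfalso
        refine pv_end t k (by omega) (by omega) ?_ H
        intro m hm
        rw [← hjn]
        exact HP m hm
  | succ fuel ih =>
    intro t j k hfuel hj0 hkj HP HL
    have hjn : j < t.length := by omega
    rw [PySem.List.pyRange_one_cons (by omega)]
    simp only [pvDuvalGo, PySem.List.pyGetD_natCast]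
    by_cases heq : t.getD j ' ' = t.getD k ' '
    · rw [if_pos heq]
      have hc1 : (k : Int) + 1 = ((k + 1 : Nat) : Int) := by push_cast; ring
      have hc2 : (j : Int) + 1 = ((j + 1 : Nat) : Int) := by push_cast; ring
      rw [hc1, hc2]
      refine ih t (j + 1) (k + 1) (by omega) (by omega) (by omega) ?_ ?_
      · intro m hm
        have hjk : (j + 1) - (k + 1) = j - k := by omega
        rw [hjk]
        rcases Nat.lt_or_ge m k with h' | h'
        · exact HP m h'
        · have hm' : m = k := by omega
          subst hm'
          have e : j - m + m = j := by omega
          rw [e]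
          exact heq
      · have hjk : (j + 1) - (k + 1) = j - k := by omega
        rw [hjk]
        exact HL
    · rw [if_neg heq]
      by_cases hlt : t.getD k ' ' < t.getD j ' '
      · rw [if_pos hlt]
        have hc2 : (j : Int) + 1 = ((j + 1 : Nat) : Int) := by push_cast; ring
        have hc0 : (0 : Int) = ((0 : Nat) : Int) := rfl
        rw [hc2, hc0]
        refine ih t (j + 1) 0 (by omega) (by omega) (by omega) ?_ ?_
        · intro m hm; omega
        · rw [Nat.sub_zero]
          exact pv_ext t j k hkj hjn HP HL hlt
      · rw [if_neg hlt]
        have hgt : t.getD j ' ' < t.getD k ' ' := by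
          rcases lt_trichotomy (t.getD j ' ') (t.getD k ' ') with h | h | h
          · exact h
          · exact absurd h heq
          · exact absurd h hlt
        constructor
        · intro hsome; cases hsome
        · intro H
          exact absurd H (pv_fail t j k hkj hjn HP hgt)

theorem pv_isSpecialB_iff (t : List Char) : pvIsSpecialB t = true ↔ pvSufLt t := by
  rw [pvIsSpecialB]
  cases t with
  | nil =>
    rw [show PySem.List.len ([] : List Char) = 0 from rfl]
    rw [PySem.List.pyRange_one_eq_nil (by norm_num)]
    simp only [pvDuvalGo]
    constructor
    · intro _ i h1 h2; simp only [List.length_nil] at h2; omega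
    · intro _; rfl
  | cons c ts =>
    have h := pv_duval_main ts.length (c :: ts) 1 0 (by simp; omega) (by omega) (by omega)
      (fun m hm => absurd hm (by omega))
      (by
        intro i h1 h2
        rw [List.length_take] at h2
        omega)
    rw [PySem.List.len_eq]
    have e1 : ((1 : Nat) : Int) = (1 : Int) := by norm_num
    have e0 : ((0 : Nat) : Int) = (0 : Int) := rfl
    rw [e1, e0] at h
    rcases hres : pvDuvalGo (c :: ts) (PySem.List.pyRange 1 ((c :: ts).length : Int) 1) 0 with _ | k
    · rw [hres] at h
      simp only []
      exact iff_of_false (by simp) (by rw [← h]; simp)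
    · rw [hres] at h
      simp only [Option.some.injEq] at h
      constructor
      · intro hk
        exact h.mp (by simpa using hk)
      · intro H
        simpa using h.mpr H

theorem pv_checker_eq (t : List Char) : pvIsSpecialB t = pvSpecialChecker t := by
  cases hA : pvSpecialChecker t <;> cases hB : pvIsSpecialB t
  · rfl
  · have h1 := (pv_specialChecker_iff t).mpr (pv_pref_of_suf t ((pv_isSpecialB_iff t).mp hB))
    rw [hA] at h1; cases h1
  · have h1 := (pv_isSpecialB_iff t).mpr (pv_suf_of_pref t ((pv_specialChecker_iff t).mp hA))
    rw [hB] at h1; cases h1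
  · rfl

-- ---- the outer loops agree ----

theorem pv_take_succ_set (acc : List Char) (j : Nat) (v : Char) (h : j < acc.length) :
    (acc.set j v).take (j + 1) = acc.take j ++ [v] := by
  induction acc generalizing j with
  | nil => simp at h
  | cons x xs ih =>
    cases j with
    | zero => simp
    | succ j => simpa using ih j (by simpa using h)

theorem pv_set_append (out : List Char) (c v : Char) (l : List Char) :
    (out ++ c :: l).set out.length v = out ++ v :: l := by
  induction out with
  | nil => simp
  | cons x xs ih => simp [ih]

-- A's 'for j in range(idx, length): next_string[j] = '1'' fills the tail with ones
theorem pv_ones_eq (k : Nat) : ∀ (a n : Int) (acc : List Char), 0 ≤ a → a + k = n →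
    n = (acc.length : Int) →
    (PySem.List.pyRange a n 1).foldl (fun b j => PySem.List.pySetD b j '1') acc
      = acc.take a.toNat ++ List.replicate k '1' := by
  induction k with
  | zero =>
    intro a n acc h0 hk hn
    rw [PySem.List.pyRange_one_eq_nil (by omega)]
    simp only [List.foldl_nil, List.replicate_zero, List.append_nil]
    rw [List.take_of_length_le (by omega)]
  | succ k ih =>
    intro a n acc h0 hk hn
    rw [PySem.List.pyRange_one_cons (by omega)]
    simp only [List.foldl_cons]
    rw [PySem.List.pySetD_of_nonneg acc '1' h0]
    rw [ih (a + 1) n (acc.set a.toNat '1') (by omega) (by omega) (by simp; omega)]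
    have hja : a.toNat < acc.length := by omega
    have h1 : (a + 1).toNat = a.toNat + 1 := by omega
    have h2 : (acc.set a.toNat '1').take (a.toNat + 1) = acc.take a.toNat ++ ['1'] :=
      pv_take_succ_set acc a.toNat '1' hja
    rw [h1, h2, List.append_assoc]
    rfl

-- A's greedy zeroing loop computes exactly B's functional rebuild
theorem pv_min_eq (k : Nat) : ∀ (j n : Int) (out : List Char), 0 ≤ j → j + k = n →
    (out.length : Int) = j →
    (PySem.List.pyRange j n 1).foldl pvStepA (out ++ List.replicate k '1')
      = pvMinB n (PySem.List.pyRange j n 1) out := by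
  induction k with
  | zero =>
    intro j n out h0 hk hlen
    rw [PySem.List.pyRange_one_eq_nil (by omega)]
    simp [pvMinB]
  | succ k ih =>
    intro j n out h0 hk hlen
    rw [PySem.List.pyRange_one_cons (by omega)]
    simp only [List.foldl_cons, pvMinB]
    have hjn : j.toNat = out.length := by omega
    have hrep : List.replicate (k + 1) '1' = '1' :: List.replicate k '1' := rfl
    have hset0 : PySem.List.pySetD (out ++ List.replicate (k + 1) '1') j '0'
        = out ++ '0' :: List.replicate k '1' := by
      rw [PySem.List.pySetD_of_nonneg _ '0' h0, hjn, hrep, pv_set_append]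
    have hset1 : PySem.List.pySetD (out ++ '0' :: List.replicate k '1') j '1'
        = out ++ '1' :: List.replicate k '1' := by
      rw [PySem.List.pySetD_of_nonneg _ '1' h0, hjn, pv_set_append]
    have hcand : (out ++ ['0']) ++ PySem.List.pyRepeat ['1'] (n - j - 1)
        = out ++ '0' :: List.replicate k '1' := by
      rw [PySem.List.pyRepeat_singleton]
      have h5 : (n - j - 1).toNat = k := by omega
      rw [h5, List.append_assoc]
      rfl
    have hch : pvIsSpecialB ((out ++ ['0']) ++ PySem.List.pyRepeat ['1'] (n - j - 1))
        = pvSpecialChecker (out ++ '0' :: List.replicate k '1') := by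
      rw [hcand, pv_checker_eq]
    rw [pvStepA]
    simp only [hset0, hch]
    by_cases hc : pvSpecialChecker (out ++ '0' :: List.replicate k '1') = true
    · rw [if_neg (by simp [hc]), if_pos hc]
      have h6 : out ++ '0' :: List.replicate k '1' = (out ++ ['0']) ++ List.replicate k '1' := by
        simp
      rw [h6, ih (j + 1) n (out ++ ['0']) (by omega) (by omega) (by simp; omega)]
    · rw [if_pos (by simpa using hc), if_neg hc, hset1]
      have h6 : out ++ '1' :: List.replicate k '1' = (out ++ ['1']) ++ List.replicate k '1' := by
        simp
      rw [h6, ih (j + 1) n (out ++ ['1']) (by omega) (by omega) (by simp; omega)]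

theorem pv_loop_eq (s : List Char) (l : List Int)
    (hl : ∀ i ∈ l, 0 ≤ i ∧ i < (s.length : Int)) :
    pvLoopA s (s.length : Int) l = pvLoopB s (s.length : Int) l := by
  induction l with
  | nil => rfl
  | cons idx rest ih =>
    obtain ⟨h0, hlt⟩ := hl idx (by simp)
    have ih' := ih (fun i hi => hl i (by simp [hi]))
    simp only [pvLoopA, pvLoopB]
    by_cases hg : PySem.List.pyGetD s idx ' ' = '1'
    · simp [hg, ih']
    · simp only [hg]
      have hkn : idx + ((s.length : Int) - idx).toNat = (s.length : Int) := by omega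
      have hns : (PySem.List.pyRange idx (s.length : Int) 1).foldl
          (fun b j => PySem.List.pySetD b j '1') s
          = s.take idx.toNat ++ List.replicate ((s.length : Int) - idx).toNat '1' :=
        pv_ones_eq _ idx _ s h0 (by omega) rfl
      have hout : PySem.List.slice s none (some idx) ++ ['1'] = s.take idx.toNat ++ ['1'] := by
        rw [PySem.List.slice_to s h0]
      have hcand : (PySem.List.slice s none (some idx) ++ ['1'])
            ++ PySem.List.pyRepeat ['1'] ((s.length : Int) - idx - 1)
          = s.take idx.toNat ++ List.replicate ((s.length : Int) - idx).toNat '1' := by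
        rw [hout, PySem.List.pyRepeat_singleton]
        have h5 : ((s.length : Int) - idx).toNat = (((s.length : Int) - idx - 1)).toNat + 1 := by
          omega
        rw [h5, List.append_assoc]
        rfl
      have hch : pvIsSpecialB ((PySem.List.slice s none (some idx) ++ ['1'])
            ++ PySem.List.pyRepeat ['1'] ((s.length : Int) - idx - 1))
          = pvSpecialChecker (s.take idx.toNat
            ++ List.replicate ((s.length : Int) - idx).toNat '1') := by
        rw [hcand, pv_checker_eq]
      rw [hns, hch]
      by_cases hc : pvSpecialChecker (s.take idx.toNat
          ++ List.replicate ((s.length : Int) - idx).toNat '1') = false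
      · simp [hc, ih']
      · simp only [hc]
        simp only [Bool.not_eq_false] at hc
        simp
        have hlen : ((s.take idx.toNat ++ ['1']).length : Int) = idx + 1 := by
          simp [List.length_take]
          omega
        have h7 : s.take idx.toNat ++ List.replicate ((s.length : Int) - idx).toNat '1'
            = (s.take idx.toNat ++ ['1'])
              ++ List.replicate (((s.length : Int) - idx - 1)).toNat '1' := by
          have h5 : ((s.length : Int) - idx).toNat = (((s.length : Int) - idx - 1)).toNat + 1 := by
            omega
          rw [h5, List.append_assoc]
          rfl
        rw [← hout] at hlen h7
        rw [h7, pv_min_eq _ (idx + 1) _ _ (by omega) (by omega) hlen]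

-- ===== VERDICT (by name: the statement is the Claim_ definition above) =====
theorem next_string_finder_spec : Claim_equal_next_string_finder := by
  intro s _
  unfold Spec_next_string_finder next_string_finder next_string_finder_alt
  simp only [PySem.List.len_eq]
  rw [pv_loop_eq]
  intro i hi
  rw [PySem.List.mem_pyRange_neg_one] at hi
  omega
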